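-- pv_equiv track=rewrite | github.com/mpgossage/advent2022 | helper.py | remove_set
-- ===== SOURCE A (Python) =====
-- def remove_set(data, rem_start, rem_end):
--     "removes rem_st..rem_end from set"
--     # simple version: using move/pop
--     result = []
--     while data:
--         start, end = data.pop(-1)
--         if start > rem_end or end < rem_start:
--             # not touching, move over
--             result.append((start, end))
--         elif rem_start <= start and rem_end < end:
--             # removing the lower section
--             result.append((rem_end + 1, end))
--         elif rem_end >= end and rem_start > start:
--             # removing the upper section
--             result.append((start, rem_start - 1))
--         elif rem_start > start and rem_end < end:
--             # complex one, its inside the range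
--             result.append((start, rem_start - 1))
--             result.append((rem_end + 1, end))
--         # else start..end is full inside & we discard
--     return result
-- ===== SOURCE B (Python) =====
-- def remove_set(data, rem_start, rem_end):
--     "removes rem_st..rem_end from set"
--     # generic remnant computation: one overlap test, then emit left/right remnants
--     result = []
--     for start, end in reversed(data):
--         if end < rem_start or start > rem_end:
--             # no overlap with the removed range: keep as is
--             result.append((start, end))
--         else:
--             if start < rem_start:
--                 result.append((start, rem_start - 1))
--             if end > rem_end:
--                 result.append((rem_end + 1, end))
--     data.clear()
--     return result
-- ===== Notes on version B (the rewrite author's own statement) =====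
-- stated objective: simpler
-- what changed: Replaces the five-way elif case analysis with a single overlap test followed by generic left/right remnant emission, and the pop(-1) drain loop with a reversed() iteration plus data.clear() (same emptying side-effect and reversed output order).
import Mathlib
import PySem

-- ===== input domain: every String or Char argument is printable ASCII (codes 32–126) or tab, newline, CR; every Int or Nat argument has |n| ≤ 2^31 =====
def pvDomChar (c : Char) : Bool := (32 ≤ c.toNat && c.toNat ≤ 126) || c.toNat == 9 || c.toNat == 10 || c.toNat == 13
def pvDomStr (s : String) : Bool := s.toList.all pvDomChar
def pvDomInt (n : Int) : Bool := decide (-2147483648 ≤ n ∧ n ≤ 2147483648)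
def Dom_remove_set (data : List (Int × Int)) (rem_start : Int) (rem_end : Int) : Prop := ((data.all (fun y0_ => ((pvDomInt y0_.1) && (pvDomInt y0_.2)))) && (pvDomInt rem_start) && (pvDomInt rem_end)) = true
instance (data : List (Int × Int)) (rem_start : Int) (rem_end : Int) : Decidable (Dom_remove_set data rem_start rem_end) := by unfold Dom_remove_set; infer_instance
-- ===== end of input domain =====

-- B replaces A's five-way elif case analysis by one overlap test plus generic left/right
-- remnant emission, iterating reversed(data) instead of draining with pop(-1); both A and B
-- empty `data` in place (A by pop, B by clear) — the equivalence proved is about the return value.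


-- ===== PORT A =====
-- the `while data: start, end = data.pop(-1)` loop processes data back-to-front,
-- appending to `result`; ported as recursion over the reversed list.
def remove_set_go (rem_start rem_end : Int) : List (Int × Int) → List (Int × Int) → List (Int × Int)
  | [], result => result
  | (start, e) :: rest, result =>
    if start > rem_end ∨ e < rem_start then
      remove_set_go rem_start rem_end rest (result ++ [(start, e)])
    else if rem_start ≤ start ∧ rem_end < e then
      remove_set_go rem_start rem_end rest (result ++ [(rem_end + 1, e)])
    else if rem_end ≥ e ∧ rem_start > start then
      remove_set_go rem_start rem_end rest (result ++ [(start, rem_start - 1)])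
    else if rem_start > start ∧ rem_end < e then
      remove_set_go rem_start rem_end rest (result ++ [(start, rem_start - 1), (rem_end + 1, e)])
    else
      remove_set_go rem_start rem_end rest result

def remove_set (data : List (Int × Int)) (rem_start : Int) (rem_end : Int) : List (Int × Int) :=
  remove_set_go rem_start rem_end data.reverse []

-- ===== PORT B =====
-- body of Source B's `for start, end in reversed(data)` loop
def remove_set_step (rem_start rem_end : Int) (result : List (Int × Int)) (p : Int × Int) : List (Int × Int) :=
  if p.2 < rem_start ∨ p.1 > rem_end then
    result ++ [p]
  else
    let r1 := if p.1 < rem_start then result ++ [(p.1, rem_start - 1)] else result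
    if p.2 > rem_end then r1 ++ [(rem_end + 1, p.2)] else r1

def remove_set_alt (data : List (Int × Int)) (rem_start : Int) (rem_end : Int) : List (Int × Int) :=
  data.reverse.foldl (remove_set_step rem_start rem_end) []

-- ===== PRECONDITION & SPEC =====
def Spec_remove_set (data : List (Int × Int)) (rem_start : Int) (rem_end : Int) (out : List (Int × Int)) : Prop := out = remove_set_alt data rem_start rem_end
instance (data : List (Int × Int)) (rem_start : Int) (rem_end : Int) (out : List (Int × Int)) : Decidable (Spec_remove_set data rem_start rem_end out) := by unfold Spec_remove_set; infer_instance

-- ===== CLAIM (what is proved, stated in full; the proofs are below) =====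
def Claim_equal_remove_set : Prop := ∀ (data : List (Int × Int)) (rem_start : Int) (rem_end : Int), Dom_remove_set data rem_start rem_end → Spec_remove_set data rem_start rem_end (remove_set data rem_start rem_end)

-- ===== LEMMAS AND PROOFS =====
theorem remove_set_go_eq_foldl (rem_start rem_end : Int) (l res : List (Int × Int)) :
    remove_set_go rem_start rem_end l res = l.foldl (remove_set_step rem_start rem_end) res := by
  induction l generalizing res with
  | nil => rfl
  | cons p t ih =>
    obtain ⟨s, e⟩ := p
    have hstep : ∀ r : List (Int × Int),
        remove_set_go rem_start rem_end t r = t.foldl (remove_set_step rem_start rem_end) r := ih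
    simp only [remove_set_go, List.foldl, remove_set_step]
    split_ifs <;> rw [hstep] <;>
      first
        | rfl
        | (exfalso; omega)
        | simp [List.append_assoc]

-- ===== VERDICT (by name: the statement is the Claim_ definition above) =====
theorem remove_set_spec : Claim_equal_remove_set := by
  intro data rem_start rem_end _
  unfold Spec_remove_set remove_set remove_set_alt
  exact remove_set_go_eq_foldl rem_start rem_end data.reverse []
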